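-- pv_equiv track=rewrite | github.com/Blajszu/Graph_Algorithms_Course | Project 1/solution.py | BFS
-- ===== SOURCE A (Python) =====
-- from collections import deque
--
-- def BFS(N, G, needed):
--     if not needed:
--         return set()
--
--     path_vertices = set()
--     start = next(iter(needed))
--
--     all_targets = needed | {start}
--     path_vertices.add(start)
--
--     for target in all_targets:
--         visited = [False] * (N+1)
--         parent = [None] * (N+1)
--         Q = deque([target])
--
--         visited[target] = True
--         found_targets = set()
--
--         while Q and len(found_targets) < len(all_targets):
--             x = Q.popleft()
--             for v in G[x]:
--                 if not visited[v]:
--                     visited[v] = True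
--                     parent[v] = x
--                     Q.append(v)
--                     if v in all_targets:
--                         found_targets.add(v)
--                         curr = v
--                         while curr is not None:
--                             path_vertices.add(curr)
--                             curr = parent[curr]
--     return path_vertices
-- ===== SOURCE B (Python) =====
-- def BFS(N, G, needed):
--     if not needed:
--         return set()
--
--     start = next(iter(needed))
--     all_targets = needed | {start}
--     path_vertices = {start}
--
--     for source in all_targets:
--         # BFS recording only distances and the visit order: no parent array, no deque
--         dist = [None] * (N + 1)
--         dist[source] = 0
--         order = [source]
--         reached = []
--         i = 0
--         while i < len(order):
--             x = order[i]
--             i += 1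
--             for v in G[x]:
--                 if dist[v] is None:
--                     dist[v] = dist[x] + 1
--                     order.append(v)
--                     if v in all_targets:
--                         reached.append(v)
--         # parent-free path reconstruction: the BFS-tree predecessor of v is the
--         # first vertex in visit order that is one level closer and adjacent to v
--         for t in reached:
--             v = t
--             while v != source:
--                 path_vertices.add(v)
--                 v = next(u for u in order if dist[u] == dist[v] - 1 and v in G[u])
--             path_vertices.add(source)
--     return path_vertices
-- ===== Notes on version B (the rewrite author's own statement) =====
-- stated objective: alternative
-- what changed: B's per-source BFS records only distances and the visit order (no parent array, no deque), and the tree paths are rebuilt afterwards parent-free: the predecessor of v is found by scanning the visit order for the first vertex one level closer and adjacent to v; …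
-- outside the precondition, e.g. on BFS(0, {0: [], 5: [7]}, {0}): A returns {0}, B returns {0}
import Mathlib
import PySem

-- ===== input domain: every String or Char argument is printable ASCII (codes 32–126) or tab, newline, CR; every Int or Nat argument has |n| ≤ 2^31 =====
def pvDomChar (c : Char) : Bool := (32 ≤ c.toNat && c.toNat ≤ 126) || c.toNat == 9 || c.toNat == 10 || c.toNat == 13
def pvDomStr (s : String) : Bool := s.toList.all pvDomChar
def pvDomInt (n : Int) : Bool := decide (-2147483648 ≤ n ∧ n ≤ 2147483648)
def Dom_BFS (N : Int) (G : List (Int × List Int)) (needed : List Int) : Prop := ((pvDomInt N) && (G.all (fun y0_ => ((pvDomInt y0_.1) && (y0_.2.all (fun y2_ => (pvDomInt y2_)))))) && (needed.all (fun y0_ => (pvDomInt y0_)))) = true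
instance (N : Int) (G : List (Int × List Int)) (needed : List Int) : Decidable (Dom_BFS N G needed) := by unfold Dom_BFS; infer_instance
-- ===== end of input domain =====

-- B replaces A's parent array and deque with a BFS that records only distances and the
-- visit order, reconstructing each tree path afterwards by scanning the visit order for
-- the first vertex one level closer and adjacent (alternative algorithm, not faster); A=B on Pre_.

-- ===== PORT A =====
-- Shared helpers (identical Python fragments in Source A and Source B):
-- `next(iter(needed))` reads CPython's set iteration order.  For int elements (|n| ≤ 2^31,
-- as Dom guarantees) hash(n) = n (hash(-1) = -2) independent of PYTHONHASHSEED, and the set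
-- reaching the function is built by inserting the distinct elements in exactly the order of
-- the list this port receives; the helpers below replay CPython 3.11's open-addressing table
-- (linear probes of 9, perturb >> 5, growth ×4 past 3/5 fill) and are exact on that domain.
def pyIntHash (n : Int) : Int := if n = -1 then -2 else n

def huOf (n : Int) : Nat := ((pyIntHash n).emod (2 ^ 64)).toNat

-- scan `c` consecutive slots from `i`: first free slot (inl), key already present (inr), or neither
def probeScan (t : List (Option Int)) (key : Int) : Nat → Nat → Option (Nat ⊕ Unit)
  | _, 0 => none
  | i, c + 1 =>
    match t.getD i none with
    | none => some (Sum.inl i)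
    | some k => if k = key then some (Sum.inr ()) else probeScan t key (i + 1) c

-- slot where `key` is to be inserted (none: already present, or fuel ran out — unreachable)
def addSlot (t : List (Option Int)) (key : Int) (mask : Nat) : Nat → Nat → Nat → Option Nat
  | 0, _, _ => none
  | f + 1, perturb, i =>
    match probeScan t key i (if i + 9 ≤ mask then 10 else 1) with
    | some (Sum.inl j) => some j
    | some (Sum.inr _) => none
    | none => addSlot t key mask f (perturb >>> 5) ((i * 5 + 1 + (perturb >>> 5)) % (mask + 1))

-- first free slot among `c` consecutive from `i` (set_insert_clean's linear segment)
def findFree (t : List (Option Int)) : Nat → Nat → Option Nat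
  | _, 0 => none
  | i, c + 1 =>
    match t.getD i none with
    | none => some i
    | some _ => findFree t (i + 1) c

def cleanSlot (t : List (Option Int)) (key : Int) (mask : Nat) : Nat → Nat → Nat → Nat
  | 0, _, i => i % (mask + 1)
  | f + 1, perturb, i =>
    match findFree t i (if i + 9 ≤ mask then 10 else 1) with
    | some j => j
    | none => cleanSlot t key mask f (perturb >>> 5) ((i * 5 + 1 + (perturb >>> 5)) % (mask + 1))

def setInsertClean (t : List (Option Int)) (key : Int) : List (Option Int) :=
  let mask := t.length - 1
  t.set (cleanSlot t key mask (mask + 65) (huOf key) (huOf key % (mask + 1))) (some key)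

def growFrom (minused : Nat) : Nat → Nat → Nat
  | s, 0 => s
  | s, f + 1 => if s ≤ minused then growFrom minused (s * 2) f else s

def setResize (t : List (Option Int)) (fill : Nat) : List (Option Int) :=
  t.foldl (fun nt e => match e with | none => nt | some k => setInsertClean nt k)
    (List.replicate (growFrom (fill * 4) 8 64) none)

def setAdd (st : Nat × List (Option Int)) (key : Int) : Nat × List (Option Int) :=
  let mask := st.2.length - 1
  match addSlot st.2 key mask (mask + 65) (huOf key) (huOf key % (mask + 1)) with
  | none => st
  | some j =>
    let t := st.2.set j (some key)
    let fill := st.1 + 1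
    if fill * 5 < mask * 3 then (fill, t) else (fill, setResize t fill)

-- next(iter(needed)) for the set built from the (distinct) elements of lst in list order
def pySetFirst (lst : List Int) : Int :=
  match lst with
  | [] => 0
  | h :: _ => ((lst.foldl setAdd (0, List.replicate 8 none)).2.findSome? id).getD h

-- Python list indexing/assignment on int indexes (negative-index wrap included)
def gB (xs : List Bool) (i : Int) : Bool := PySem.List.pyGetD xs i false
def sB (xs : List Bool) (i : Int) (b : Bool) : List Bool := PySem.List.pySetD xs i b
def gP (xs : List (Option Int)) (i : Int) : Option Int := PySem.List.pyGetD xs i none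
def sP (xs : List (Option Int)) (i : Int) (p : Option Int) : List (Option Int) := PySem.List.pySetD xs i p

-- G[x]; Pre_ guarantees the key is present wherever the Python actually looks one up
def adjOf (G : List (Int × List Int)) (x : Int) : List Int := (PySem.Dict.mk G).getD x []

-- A's `while curr is not None` path walk
def walkChain (par : List (Option Int)) : Nat → Int → PySem.Set Int → PySem.Set Int
  | 0, _, pv => pv
  | f + 1, curr, pv =>
    let pv' := PySem.Set.add pv curr
    match gP par curr with
    | none => pv'
    | some p => walkChain par f p pv'

-- A's inner `for v in G[x]` body; state (visited, parent, Q, found_targets, path_vertices)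
def stepA (allT : PySem.Set Int) (wf : Nat) (x : Int)
    (st : List Bool × List (Option Int) × List Int × PySem.Set Int × PySem.Set Int) (v : Int) :
    List Bool × List (Option Int) × List Int × PySem.Set Int × PySem.Set Int :=
  if gB st.1 v then st
  else
    let vis := sB st.1 v true
    let par := sP st.2.1 v (some x)
    let Q := st.2.2.1 ++ [v]
    if PySem.Set.contains allT v then
      (vis, par, Q, PySem.Set.add st.2.2.2.1 v, walkChain par wf v st.2.2.2.2)
    else (vis, par, Q, st.2.2.2.1, st.2.2.2.2)

-- A's `while Q and len(found_targets) < len(all_targets)` loop (fuel ≥ number of pops)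
def loopA (G : List (Int × List Int)) (allT : PySem.Set Int) (wf : Nat) :
    Nat → List Int → List Bool → List (Option Int) → PySem.Set Int → PySem.Set Int → PySem.Set Int
  | 0, _, _, _, _, pv => pv
  | f + 1, Q, vis, par, found, pv =>
    match Q with
    | [] => pv
    | x :: Qt =>
      if PySem.Set.len found < PySem.Set.len allT then
        let s := (adjOf G x).foldl (stepA allT wf x) (vis, par, Qt, found, pv)
        loopA G allT wf f s.2.2.1 s.1 s.2.1 s.2.2.2.1 s.2.2.2.2
      else pv

-- for each BFS run: ≤ N+2 pops, and every parent chain has ≤ N+1 vertices, so fuel (N+2).toNat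
-- never runs out; `for target in all_targets` is iterated in this list's order — the resulting
-- SET does not depend on it (each iteration's contribution depends only on `target`)
def BFS (N : Int) (G : List (Int × List Int)) (needed : List Int) : List Int :=
  if needed = [] then []
  else
    let start := pySetFirst needed
    let allT := PySem.Set.add (PySem.Set.ofList needed) start
    let wf := (N + 2).toNat
    allT.foldl
      (fun pv target =>
        let vis := sB (List.replicate (N + 1).toNat false) target true
        let par := List.replicate (N + 1).toNat (none : Option Int)
        loopA G allT wf wf [target] vis par PySem.Set.empty pv)
      (PySem.Set.add PySem.Set.empty start)

-- ===== PORT B =====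
-- `dist[u] == dist[v] - 1 and v in G[u]`; dist[v] is an int wherever Python evaluates
-- this (v is a visited vertex), so the `.getD 0` default is never read on admitted inputs
def condSc (G : List (Int × List Int)) (dist : List (Option Int)) (v u : Int) : Bool :=
  (match gP dist u with
   | some du => du == (gP dist v).getD 0 - 1
   | none => false) && (adjOf G u).contains v

-- B's inner `while v != source` walk; on `next(...)` finding no match Python would raise
-- StopIteration — unreachable on admitted inputs, the none branch returns the set built so far
def walkL (G : List (Int × List Int)) (order : List Int) (dist : List (Option Int)) (s : Int) :
    Nat → Int → PySem.Set Int → PySem.Set Int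
  | 0, _, pv => pv
  | f + 1, v, pv =>
    if v = s then PySem.Set.add pv s
    else
      let pv' := PySem.Set.add pv v
      match order.find? (fun u => condSc G dist v u) with
      | some u => walkL G order dist s f u pv'
      | none => pv'

-- B's inner `for v in G[x]` body; state (dist, order, reached); dist[x] is set when read
def stepD (allT : PySem.Set Int) (x : Int)
    (st : List (Option Int) × List Int × List Int) (v : Int) :
    List (Option Int) × List Int × List Int :=
  if (gP st.1 v).isSome then st
  else
    (sP st.1 v (some ((gP st.1 x).getD 0 + 1)), st.2.1 ++ [v],
     if PySem.Set.contains allT v then st.2.2 ++ [v] else st.2.2)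

-- B's `while i < len(order)` loop: BFS filling dist[] and the visit order, collecting reached targets
def loopD (G : List (Int × List Int)) (allT : PySem.Set Int) :
    Nat → List Int → Nat → List (Option Int) → List Int → List Int × List (Option Int) × List Int
  | 0, q, _, dist, r => (q, dist, r)
  | f + 1, q, i, dist, r =>
    if i < q.length then
      let x := q.getD i 0
      let s := (adjOf G x).foldl (stepD allT x) (dist, q, r)
      loopD G allT f s.2.1 (i + 1) s.1 s.2.2
    else (q, dist, r)

def BFS_alt (N : Int) (G : List (Int × List Int)) (needed : List Int) : List Int :=
  if needed = [] then []
  else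
    let start := pySetFirst needed
    let allT := PySem.Set.add (PySem.Set.ofList needed) start
    let wf := (N + 2).toNat
    allT.foldl
      (fun pv source =>
        let dist0 := sP (List.replicate (N + 1).toNat (none : Option Int)) source (some 0)
        let st := loopD G allT wf [source] 0 dist0 []
        st.2.2.foldl (fun acc t => walkL G st.1 st.2.1 source wf t acc) pv)
      (PySem.Set.add PySem.Set.empty start)

-- ===== PRECONDITION & SPEC =====
-- Pre_ excludes inputs whose targets or adjacency-list entries fall outside the visited/parent
-- tables (beyond Python's negative-index wrap, which is kept) or are absent from G's keys:
-- on every vertex the BFS actually touches A raises IndexError/KeyError there; for bad entries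
-- hanging off unreachable keys A still returns (and B returns the same value) — they are
-- excluded only because reachability is not a closed-form condition.
def Pre_BFS (N : Int) (G : List (Int × List Int)) (needed : List Int) : Prop :=
  needed = [] ∨
  ((∀ t ∈ needed, (-(N + 1) ≤ t ∧ t ≤ N) ∧ t ∈ G.map Prod.fst) ∧
   (∀ p ∈ G, ∀ v ∈ p.2, (-(N + 1) ≤ v ∧ v ≤ N) ∧ v ∈ G.map Prod.fst))
instance (N : Int) (G : List (Int × List Int)) (needed : List Int) : Decidable (Pre_BFS N G needed) := by
  unfold Pre_BFS; infer_instance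

def pvWitness_BFS : Int × (List (Int × List Int)) × List Int :=
  (2, [(0, [1]), (1, [0, 2]), (2, [])], [0, 2])

def Spec_BFS (N : Int) (G : List (Int × List Int)) (needed : List Int) (out : List Int) : Prop :=
  out = BFS_alt N G needed
instance (N : Int) (G : List (Int × List Int)) (needed : List Int) (out : List Int) :
    Decidable (Spec_BFS N G needed out) := by unfold Spec_BFS; infer_instance

-- ===== CLAIM (what is proved, stated in full; the proofs are below) =====
def Claim_equal_BFS : Prop := ∀ (N : Int) (G : List (Int × List Int)) (needed : List Int),
  Dom_BFS N G needed → Pre_BFS N G needed → Spec_BFS N G needed (BFS N G needed)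

-- ===== LEMMAS AND PROOFS =====

-- ---- the proof's mid-layer: A's BFS with its parent table but the chain walks deferred ----

def stepB (allT : PySem.Set Int) (x : Int)
    (st : List Bool × List (Option Int) × List Int × List Int) (v : Int) :
    List Bool × List (Option Int) × List Int × List Int :=
  if gB st.1 v then st
  else
    (sB st.1 v true, sP st.2.1 v (some x), st.2.2.1 ++ [v],
      if PySem.Set.contains allT v then st.2.2.2 ++ [v] else st.2.2.2)

def loopB (G : List (Int × List Int)) (allT : PySem.Set Int) :
    Nat → List Int → Nat → List Bool → List (Option Int) → List Int → List (Option Int) × List Int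
  | 0, _, _, _, par, r => (par, r)
  | f + 1, q, i, vis, par, r =>
    if i < q.length then
      let x := q.getD i 0
      let s := (adjOf G x).foldl (stepB allT x) (vis, par, q, r)
      loopB G allT f s.2.2.1 (i + 1) s.1 s.2.1 s.2.2.2
    else (par, r)

-- ---- table-entry bookkeeping for pySetFirst: every stored key was inserted ----

def entOk (t : List (Option Int)) (S : List Int) : Prop := ∀ k : Int, some k ∈ t → k ∈ S

theorem entOk_repl {n : Nat} {S : List Int} : entOk (List.replicate n none) S := by
  intro k h; have := List.eq_of_mem_replicate h; simp at this

theorem entOk_set {t : List (Option Int)} {S : List Int} {j : Nat} {k : Int}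
    (h : entOk t S) (hk : k ∈ S) : entOk (t.set j (some k)) S := by
  intro k' h'
  rcases List.mem_or_eq_of_mem_set h' with h'' | h''
  · exact h _ h''
  · cases h''; exact hk

theorem entOk_insertClean {t : List (Option Int)} {S : List Int} {k : Int}
    (h : entOk t S) (hk : k ∈ S) : entOk (setInsertClean t k) S := by
  unfold setInsertClean; exact entOk_set h hk

theorem entOk_resize_aux {S : List Int} (l : List (Option Int)) :
    ∀ acc : List (Option Int), entOk acc S → (∀ k : Int, some k ∈ l → k ∈ S) →
    entOk (l.foldl (fun nt e => match e with | none => nt | some k => setInsertClean nt k) acc) S := by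
  induction l with
  | nil => intro acc ha _; exact ha
  | cons e tl ih =>
    intro acc ha hl
    cases e with
    | none => exact ih acc ha (fun k hk => hl k (by simp [hk]))
    | some k =>
      exact ih _ (entOk_insertClean ha (hl k (by simp))) (fun k' hk' => hl k' (by simp [hk']))

theorem entOk_resize {t : List (Option Int)} {S : List Int} {f : Nat}
    (h : entOk t S) : entOk (setResize t f) S := by
  unfold setResize
  exact entOk_resize_aux t _ entOk_repl (fun k hk => h k hk)

theorem entOk_setAdd {st : Nat × List (Option Int)} {S : List Int} {key : Int}
    (h : entOk st.2 S) (hk : key ∈ S) : entOk (setAdd st key).2 S := by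
  unfold setAdd
  cases haddSlot : addSlot st.2 key (st.2.length - 1) (st.2.length - 1 + 65) (huOf key)
      (huOf key % (st.2.length - 1 + 1)) with
  | none => simpa [haddSlot] using h
  | some j =>
    simp only [haddSlot]
    by_cases hlt : (st.1 + 1) * 5 < (st.2.length - 1) * 3
    · simpa [hlt] using entOk_set h hk
    · simpa [hlt] using entOk_resize (entOk_set h hk)

theorem entOk_foldl {S : List Int} (l : List Int) :
    ∀ st : Nat × List (Option Int), (∀ k ∈ l, k ∈ S) → entOk st.2 S →
    entOk ((l.foldl setAdd st)).2 S := by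
  induction l with
  | nil => intro st _ h; exact h
  | cons k tl ih =>
    intro st hl h
    exact ih _ (fun k' hk' => hl k' (by simp [hk'])) (entOk_setAdd h (hl k (by simp)))

theorem pySetFirst_mem {lst : List Int} (h : lst ≠ []) : pySetFirst lst ∈ lst := by
  cases lst with
  | nil => exact absurd rfl h
  | cons a tl =>
    unfold pySetFirst
    cases hfs : ((a :: tl).foldl setAdd (0, List.replicate 8 none)).2.findSome? id with
    | none => simp
    | some k =>
      have hx := List.exists_of_findSome?_eq_some hfs
      rcases hx with ⟨o, ho, hok⟩
      have : o = some k := hok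
      subst this
      have hent : entOk ((a :: tl).foldl setAdd (0, List.replicate 8 none)).2 (a :: tl) :=
        entOk_foldl _ _ (fun k' hk' => hk') entOk_repl
      simpa using hent k ho

-- ---- slot-level view of the visited/parent/dist tables ----

def InR (N v : Int) : Prop := -(N + 1) ≤ v ∧ v ≤ N

def slotN (N v : Int) : Nat := if 0 ≤ v then v.toNat else ((N + 1) + v).toNat

theorem slot_lt {N v : Int} (h : InR N v) : slotN N v < (N + 1).toNat := by
  rcases h with ⟨h1, h2⟩; unfold slotN; split <;> omega

theorem pyIdx_slot {N v : Int} (h : InR N v) :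
    PySem.List.pyIdx? (N + 1).toNat v = some (slotN N v) := by
  rcases h with ⟨h1, h2⟩
  unfold PySem.List.pyIdx? slotN
  split
  · split
    · rfl
    · omega
  · split
    · congr 1; omega
    · omega

theorem pyGetD_slot {α : Type} {N v : Int} {xs : List α} {d : α}
    (hL : xs.length = (N + 1).toNat) (h : InR N v) :
    PySem.List.pyGetD xs v d = xs.getD (slotN N v) d := by
  unfold PySem.List.pyGetD PySem.List.pyGet?
  rw [hL, pyIdx_slot h]
  simp [List.getD]

theorem pySetD_slot {α : Type} {N v : Int} {xs : List α} {a : α}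
    (hL : xs.length = (N + 1).toNat) (h : InR N v) :
    PySem.List.pySetD xs v a = xs.set (slotN N v) a := by
  unfold PySem.List.pySetD PySem.List.pySet?
  rw [hL, pyIdx_slot h]
  rfl

theorem getD_set_slot {α : Type} (xs : List α) (j k : Nat) (a d : α) (hj : j < xs.length) :
    (xs.set j a).getD k d = if k = j then a else xs.getD k d := by
  simp only [List.getD, List.getElem?_set]
  by_cases h : k = j
  · simp [h, hj]
  · have h' : ¬ j = k := fun hh => h hh.symm
    simp [h, h']

theorem len_sB {vis : List Bool} {v : Int} {b : Bool} :
    (sB vis v b).length = vis.length := by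
  unfold sB PySem.List.pySetD PySem.List.pySet?
  cases PySem.List.pyIdx? vis.length v <;> simp

theorem len_sP {par : List (Option Int)} {v : Int} {p : Option Int} :
    (sP par v p).length = par.length := by
  unfold sP PySem.List.pySetD PySem.List.pySet?
  cases PySem.List.pyIdx? par.length v <;> simp

theorem gB_eq {N : Int} {vis : List Bool} {v : Int}
    (hL : vis.length = (N + 1).toNat) (h : InR N v) :
    gB vis v = vis.getD (slotN N v) false := pyGetD_slot hL h

theorem gP_eq {N : Int} {par : List (Option Int)} {v : Int}
    (hL : par.length = (N + 1).toNat) (h : InR N v) :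
    gP par v = par.getD (slotN N v) none := pyGetD_slot hL h

theorem gB_sB {N : Int} {vis : List Bool} {u v : Int} {b : Bool}
    (hL : vis.length = (N + 1).toNat) (hu : InR N u) (hv : InR N v) :
    gB (sB vis v b) u = if slotN N u = slotN N v then b else gB vis u := by
  have hL' : (sB vis v b).length = (N + 1).toNat := by rw [len_sB, hL]
  rw [gB_eq hL' hu, gB_eq hL hu, sB, pySetD_slot hL hv,
    getD_set_slot _ _ _ _ _ (by rw [hL]; exact slot_lt hv)]

theorem gP_sP {N : Int} {par : List (Option Int)} {u v : Int} {p : Option Int}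
    (hL : par.length = (N + 1).toNat) (hu : InR N u) (hv : InR N v) :
    gP (sP par v p) u = if slotN N u = slotN N v then p else gP par u := by
  have hL' : (sP par v p).length = (N + 1).toNat := by rw [len_sP, hL]
  rw [gP_eq hL' hu, gP_eq hL hu, sP, pySetD_slot hL hv,
    getD_set_slot _ _ _ _ _ (by rw [hL]; exact slot_lt hv)]

theorem gB_slot_congr {N : Int} {vis : List Bool} {u v : Int}
    (hL : vis.length = (N + 1).toNat) (hu : InR N u) (hv : InR N v)
    (hs : slotN N u = slotN N v) : gB vis u = gB vis v := by
  rw [gB_eq hL hu, gB_eq hL hv, hs]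

theorem gB_repl {N v : Int} (h : InR N v) :
    gB (List.replicate (N + 1).toNat false) v = false := by
  rw [gB_eq (by simp) h]
  have := slot_lt h
  simp [List.getD, this]

theorem gP_repl {N v : Int} (h : InR N v) :
    gP (List.replicate (N + 1).toNat (none : Option Int)) v = none := by
  rw [gP_eq (by simp) h]
  have := slot_lt h
  simp [List.getD, this]

-- parent entries always point from a visited vertex to a visited vertex
def InvP (N : Int) (vis : List Bool) (par : List (Option Int)) : Prop :=
  ∀ v w : Int, InR N v → gP par v = some w → gB vis v = true ∧ InR N w ∧ gB vis w = true

theorem InvP_repl {N : Int} {vis : List Bool} :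
    InvP N vis (List.replicate (N + 1).toNat (none : Option Int)) := by
  intro v w hv hp
  rw [gP_repl hv] at hp
  cases hp

-- the chain walk only reads parent entries of visited vertices, which P preserves
theorem walk_agree {N : Int} {vis : List Bool} {par P : List (Option Int)}
    (hag : ∀ u : Int, InR N u → gB vis u = true → gP P u = gP par u)
    (hInv : InvP N vis par) :
    ∀ (f : Nat) (v : Int) (pv : PySem.Set Int), InR N v → gB vis v = true →
      walkChain par f v pv = walkChain P f v pv := by
  intro f
  induction f with
  | zero => intro v pv _ _; rfl
  | succ f ih =>
    intro v pv hv hbv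
    unfold walkChain
    rw [hag v hv hbv]
    cases hp : gP par v with
    | none => rfl
    | some p =>
      obtain ⟨_, hpR, hpb⟩ := hInv v p hv hp
      exact ih p _ hpR hpb

-- ---- the mid-layer's reached-list is only appended to ----

theorem foldB_r (allT : PySem.Set Int) (x : Int) (vs : List Int) :
    ∀ (vis : List Bool) (par : List (Option Int)) (q r₁ r₂ : List Int),
    vs.foldl (stepB allT x) (vis, par, q, r₁ ++ r₂)
      = ((vs.foldl (stepB allT x) (vis, par, q, r₂)).1,
         (vs.foldl (stepB allT x) (vis, par, q, r₂)).2.1,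
         (vs.foldl (stepB allT x) (vis, par, q, r₂)).2.2.1,
         r₁ ++ (vs.foldl (stepB allT x) (vis, par, q, r₂)).2.2.2) := by
  induction vs with
  | nil => intro vis par q r₁ r₂; rfl
  | cons v tl ih =>
    intro vis par q r₁ r₂
    by_cases hv : gB vis v
    · simp only [List.foldl_cons, stepB, hv, if_true]
      exact ih vis par q r₁ r₂
    · by_cases ht : PySem.Set.contains allT v
      · simp only [List.foldl_cons, stepB, hv, ht, if_true, List.append_assoc]
        exact ih _ _ _ r₁ (r₂ ++ [v])
      · simp only [List.foldl_cons, stepB, hv, ht]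
        exact ih _ _ _ r₁ r₂

theorem loopB_r (G : List (Int × List Int)) (allT : PySem.Set Int) :
    ∀ (f : Nat) (q : List Int) (i : Nat) (vis : List Bool) (par : List (Option Int)) (r : List Int),
    loopB G allT f q i vis par r
      = ((loopB G allT f q i vis par []).1, r ++ (loopB G allT f q i vis par []).2) := by
  intro f
  induction f with
  | zero => intro q i vis par r; simp [loopB]
  | succ f ih =>
    intro q i vis par r
    by_cases hq : i < q.length
    · have hr := foldB_r allT (q.getD i 0) (adjOf G (q.getD i 0)) vis par q r []
      rw [List.append_nil] at hr
      simp only [loopB, hq, if_true, hr]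
      rw [ih _ (i+1) _ _ (r ++ _)]
      conv_rhs => rw [ih]
      simp [List.append_assoc]
    · simp [loopB, hq]

-- ---- one pop: A's interleaved fold and the mid-layer's plain fold, related slot by slot ----

structure ABRel (N : Int) (allT : PySem.Set Int) (wf : Nat)
    (vis : List Bool) (par : List (Option Int)) (found pv : PySem.Set Int) (i : Nat) (s x : Int)
    (a : List Bool × List (Option Int) × List Int × PySem.Set Int × PySem.Set Int)
    (b : List Bool × List (Option Int) × List Int × List Int) : Prop where
  vis_eq : a.1 = b.1
  par_eq : a.2.1 = b.2.1
  q_eq : a.2.2.1 = b.2.2.1.drop (i + 1)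
  found_eq : a.2.2.2.1 = found ++ b.2.2.2
  qlen : i + 1 ≤ b.2.2.1.length
  lv : a.1.length = (N + 1).toNat
  lp : a.2.1.length = (N + 1).toNat
  inv : InvP N a.1 a.2.1
  mono : ∀ u : Int, InR N u → gB vis u = true → gB a.1 u = true
  stab : ∀ u : Int, InR N u → gB vis u = true → gP a.2.1 u = gP par u
  wit : gB a.1 s = true ∧ s ∉ a.2.2.2.1
  fvis : ∀ y ∈ a.2.2.2.1, InR N y ∧ gB a.1 y = true
  fsub : ∀ y ∈ a.2.2.2.1, y ∈ allT
  fnd : a.2.2.2.1.Nodup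
  qvis : ∀ y ∈ b.2.2.1.drop (i + 1), InR N y ∧ gB a.1 y = true
  xvis : gB a.1 x = true
  pveq : ∀ P : List (Option Int),
      (∀ u : Int, InR N u → gB a.1 u = true → gP P u = gP a.2.1 u) →
      a.2.2.2.2 = b.2.2.2.foldl (fun acc t => walkChain P wf t acc) pv

theorem foldAB (N : Int) (allT : PySem.Set Int) (wf : Nat) (x : Int) (s : Int) (i : Nat)
    (vs : List Int) :
    ∀ (vis : List Bool) (par : List (Option Int)) (q : List Int) (found pv : PySem.Set Int),
    (∀ v ∈ vs, InR N v) →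
    vis.length = (N + 1).toNat → par.length = (N + 1).toNat →
    InvP N vis par →
    (InR N x ∧ gB vis x = true) →
    i + 1 ≤ q.length →
    (InR N s ∧ gB vis s = true ∧ s ∉ found) →
    (∀ y ∈ found, InR N y ∧ gB vis y = true) →
    (∀ y ∈ found, y ∈ allT) → found.Nodup →
    (∀ y ∈ q.drop (i + 1), InR N y ∧ gB vis y = true) →
    ABRel N allT wf vis par found pv i s x
      (vs.foldl (stepA allT wf x) (vis, par, q.drop (i + 1), found, pv))
      (vs.foldl (stepB allT x) (vis, par, q, [])) := by
  induction vs with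
  | nil =>
    intro vis par q found pv hvs hlv hlp hInv hx hqlen hs hfv hfsub hnd hQ
    exact {
      vis_eq := rfl, par_eq := rfl, q_eq := rfl
      found_eq := by simp
      qlen := hqlen, lv := hlv, lp := hlp, inv := hInv
      mono := fun u _ h => h
      stab := fun u _ _ => rfl
      wit := ⟨hs.2.1, hs.2.2⟩
      fvis := hfv, fsub := hfsub, fnd := hnd, qvis := hQ
      xvis := hx.2
      pveq := fun P _ => by simp }
  | cons v tl ih =>
    intro vis par q found pv hvs hlv hlp hInv hx hqlen hs hfv hfsub hnd hQ
    have hInRv : InR N v := hvs v (by simp)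
    by_cases hv : gB vis v = true
    · simp only [List.foldl_cons, stepA, stepB, hv, if_true]
      exact ih vis par q found pv (fun y hy => hvs y (by simp [hy])) hlv hlp hInv hx hqlen hs
        hfv hfsub hnd hQ
    · have hvf : gB vis v = false := by simpa using hv
      have hne_of_vis : ∀ u : Int, gB vis u = true → u ≠ v := by
        intro u hu hc; rw [hc, hvf] at hu; cases hu
      have hslot_ne : ∀ u : Int, InR N u → gB vis u = true → slotN N u ≠ slotN N v := by
        intro u hu hbu hc
        rw [gB_slot_congr hlv hu hInRv hc, hvf] at hbu; cases hbu
      have hlv1 : (sB vis v true).length = (N + 1).toNat := by rw [len_sB, hlv]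
      have hlp1 : (sP par v (some x)).length = (N + 1).toNat := by rw [len_sP, hlp]
      have mono1 : ∀ u : Int, InR N u → gB vis u = true → gB (sB vis v true) u = true := by
        intro u hu hbu
        rw [gB_sB hlv hu hInRv]
        split <;> simp [hbu]
      have stab1 : ∀ u : Int, InR N u → gB vis u = true →
          gP (sP par v (some x)) u = gP par u := by
        intro u hu hbu
        rw [gP_sP hlp hu hInRv]
        split
        · exact absurd ‹slotN N u = slotN N v› (hslot_ne u hu hbu)
        · rfl
      have vis1v : gB (sB vis v true) v = true := by
        rw [gB_sB hlv hInRv hInRv]; simp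
      have inv1 : InvP N (sB vis v true) (sP par v (some x)) := by
        intro u w hu hp
        rw [gP_sP hlp hu hInRv] at hp
        by_cases hc : slotN N u = slotN N v
        · rw [if_pos hc] at hp
          cases hp
          refine ⟨?_, hx.1, mono1 x hx.1 hx.2⟩
          rw [gB_sB hlv hu hInRv, if_pos hc]
        · rw [if_neg hc] at hp
          obtain ⟨b1, b2, b3⟩ := hInv u w hu hp
          exact ⟨mono1 u hu b1, b2, mono1 w b2 b3⟩
      have hvnotin : v ∉ found := fun hvm => hne_of_vis v (hfv v hvm).2 rfl
      have hdrop1 : (q ++ [v]).drop (i + 1) = q.drop (i + 1) ++ [v] :=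
        List.drop_append_of_le_length hqlen
      have hx1 : InR N x ∧ gB (sB vis v true) x = true := ⟨hx.1, mono1 x hx.1 hx.2⟩
      have hqlen1 : i + 1 ≤ (q ++ [v]).length := by simp; omega
      have hs1base : InR N s ∧ gB (sB vis v true) s = true := ⟨hs.1, mono1 s hs.1 hs.2.1⟩
      have hQ1 : ∀ y ∈ (q ++ [v]).drop (i + 1), InR N y ∧ gB (sB vis v true) y = true := by
        rw [hdrop1]
        intro y hy
        rcases List.mem_append.1 hy with hy | hy
        · obtain ⟨h1, h2⟩ := hQ y hy
          exact ⟨h1, mono1 y h1 h2⟩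
        · simp at hy; subst hy; exact ⟨hInRv, vis1v⟩
      by_cases ht : PySem.Set.contains allT v
      · -- v is a target: A walks the chain now, the mid-layer records it
        have hvT : v ∈ allT := (PySem.Set.contains_iff allT v).1 ht
        have hfadd : PySem.Set.add found v = found ++ [v] := PySem.Set.add_of_not_mem hvnotin
        have hfv1 : ∀ y ∈ found ++ [v], InR N y ∧ gB (sB vis v true) y = true := by
          intro y hy
          rcases List.mem_append.1 hy with hy | hy
          · obtain ⟨h1, h2⟩ := hfv y hy
            exact ⟨h1, mono1 y h1 h2⟩
          · simp at hy; subst hy; exact ⟨hInRv, vis1v⟩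
        have hfsub1 : ∀ y ∈ found ++ [v], y ∈ allT := by
          intro y hy
          rcases List.mem_append.1 hy with hy | hy
          · exact hfsub y hy
          · simp at hy; subst hy; exact hvT
        have hnd1 : (found ++ [v]).Nodup := by
          simp only [List.nodup_append, List.nodup_singleton, true_and]
          exact ⟨hnd, by simp; exact fun a ha hc => hvnotin (hc ▸ ha)⟩
        have hs1 : InR N s ∧ gB (sB vis v true) s = true ∧ s ∉ found ++ [v] := by
          refine ⟨hs1base.1, hs1base.2, ?_⟩
          simp only [List.mem_append, List.mem_singleton]
          rintro (hc | hc)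
          · exact hs.2.2 hc
          · exact hne_of_vis s hs.2.1 hc
        have R := ih (sB vis v true) (sP par v (some x)) (q ++ [v]) (found ++ [v])
          (walkChain (sP par v (some x)) wf v pv)
          (fun y hy => hvs y (by simp [hy])) hlv1 hlp1 inv1 hx1 hqlen1 hs1 hfv1 hfsub1 hnd1 hQ1
        have hbr := foldB_r allT x tl (sB vis v true) (sP par v (some x)) (q ++ [v]) [v] []
        rw [List.append_nil] at hbr
        rw [hdrop1] at R
        simp only [List.foldl_cons, stepA, stepB, hvf, Bool.false_eq_true, if_false, ht,
          if_true, hfadd, List.nil_append, hbr]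
        exact {
          vis_eq := R.vis_eq, par_eq := R.par_eq
          q_eq := R.q_eq
          found_eq := by rw [R.found_eq]; simp
          qlen := R.qlen, lv := R.lv, lp := R.lp, inv := R.inv
          mono := fun u hu hb => R.mono u hu (mono1 u hu hb)
          stab := fun u hu hb => (R.stab u hu (mono1 u hu hb)).trans (stab1 u hu hb)
          wit := R.wit
          fvis := R.fvis, fsub := R.fsub, fnd := R.fnd, qvis := R.qvis, xvis := R.xvis
          pveq := by
            intro P hag
            have hPpar1 : ∀ u : Int, InR N u → gB (sB vis v true) u = true →
                gP P u = gP (sP par v (some x)) u :=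
              fun u hu hb => (hag u hu (R.mono u hu hb)).trans (R.stab u hu hb)
            have hwalk := walk_agree hPpar1 inv1 wf v pv hInRv vis1v
            rw [R.pveq P hag, hwalk]
            simp }
      · have R := ih (sB vis v true) (sP par v (some x)) (q ++ [v]) found pv
          (fun y hy => hvs y (by simp [hy])) hlv1 hlp1 inv1 hx1 hqlen1
          ⟨hs1base.1, hs1base.2, hs.2.2⟩
          (fun y hy => ⟨(hfv y hy).1, mono1 y (hfv y hy).1 (hfv y hy).2⟩)
          hfsub hnd hQ1
        rw [hdrop1] at R
        simp only [List.foldl_cons, stepA, stepB, hvf, Bool.false_eq_true, if_false, ht]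
        exact {
          vis_eq := R.vis_eq, par_eq := R.par_eq, q_eq := R.q_eq
          found_eq := R.found_eq
          qlen := R.qlen, lv := R.lv, lp := R.lp, inv := R.inv
          mono := fun u hu hb => R.mono u hu (mono1 u hu hb)
          stab := fun u hu hb => (R.stab u hu (mono1 u hu hb)).trans (stab1 u hu hb)
          wit := R.wit
          fvis := R.fvis, fsub := R.fsub, fnd := R.fnd, qvis := R.qvis, xvis := R.xvis
          pveq := R.pveq }

theorem adj_InR {N : Int} {G : List (Int × List Int)}
    (hG : ∀ p ∈ G, ∀ v ∈ p.2, InR N v) (x : Int) : ∀ v ∈ adjOf G x, InR N v := by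
  intro v hv
  unfold adjOf PySem.Dict.getD at hv
  cases hget : (PySem.Dict.mk G).get? x with
  | none => rw [hget] at hv; simp at hv
  | some vs =>
    rw [hget] at hv
    have hmem : (x, vs) ∈ (PySem.Dict.mk G).items := PySem.Dict.mem_items_of_get?_eq_some _ hget
    exact hG (x, vs) hmem v hv

theorem found_lt {found allT : List Int} {s : Int} (hnd : found.Nodup)
    (hsub : ∀ y ∈ found, y ∈ allT) (hsT : s ∈ allT) (hsf : s ∉ found) :
    PySem.Set.len found < PySem.Set.len allT := by
  have hnd' : (s :: found).Nodup := by simp [hnd, hsf]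
  have hsub' : (s :: found) ⊆ allT := by
    intro y hy
    rcases List.mem_cons.1 hy with hy | hy
    · exact hy ▸ hsT
    · exact hsub y hy
  have hle := (List.subperm_of_subset hnd' hsub').length_le
  simp only [List.length_cons] at hle
  simp only [PySem.Set.len]
  omega

-- the per-pop relation, iterated over the whole BFS loop
theorem loop_eq (N : Int) (G : List (Int × List Int)) (allT : PySem.Set Int) (wf : Nat)
    (hG : ∀ p ∈ G, ∀ v ∈ p.2, InR N v) :
    ∀ (f : Nat) (q : List Int) (i : Nat) (vis : List Bool) (par : List (Option Int))
      (found pv : PySem.Set Int) (s : Int),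
    vis.length = (N + 1).toNat → par.length = (N + 1).toNat →
    InvP N vis par →
    (s ∈ allT ∧ InR N s ∧ gB vis s = true ∧ s ∉ found) →
    (∀ y ∈ found, InR N y ∧ gB vis y = true) →
    (∀ y ∈ found, y ∈ allT) → found.Nodup →
    (∀ y ∈ q.drop i, InR N y ∧ gB vis y = true) →
    (loopA G allT wf f (q.drop i) vis par found pv
      = (loopB G allT f q i vis par []).2.foldl
          (fun acc t => walkChain (loopB G allT f q i vis par []).1 wf t acc) pv) ∧
    (∀ u : Int, InR N u → gB vis u = true →
      gP (loopB G allT f q i vis par []).1 u = gP par u) ∧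
    (loopB G allT f q i vis par []).1.length = (N + 1).toNat := by
  intro f
  induction f with
  | zero =>
    intro q i vis par found pv s hlv hlp hInv hs hfv hfsub hnd hQ
    exact ⟨rfl, fun u _ _ => rfl, hlp⟩
  | succ f ih =>
    intro q i vis par found pv s hlv hlp hInv hs hfv hfsub hnd hQ
    cases hQd : q.drop i with
    | nil =>
      have hge : ¬ i < q.length := by
        intro hlt
        rw [List.drop_eq_getElem_cons hlt] at hQd
        cases hQd
      have hB : loopB G allT (f + 1) q i vis par [] = (par, []) := by
        simp [loopB, hge]
      rw [hB]
      exact ⟨by simp [loopA], fun u _ _ => rfl, hlp⟩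
    | cons x Qt =>
      have hilt : i < q.length := by
        by_contra hge
        rw [List.drop_eq_nil_of_le (by omega)] at hQd
        cases hQd
      have hdropc := List.drop_eq_getElem_cons hilt
      rw [hQd] at hdropc
      obtain ⟨hxq, hQt⟩ : x = q[i] ∧ Qt = q.drop (i + 1) := by
        injection hdropc with h1 h2; exact ⟨h1, h2⟩
      have hgetD : q.getD i 0 = x := by rw [List.getD_eq_getElem q 0 hilt, ← hxq]
      have hxmem : x ∈ q.drop i := by rw [hQd]; simp
      obtain ⟨hxInR, hxvis⟩ := hQ x hxmem
      have hQ' : ∀ y ∈ q.drop (i + 1), InR N y ∧ gB vis y = true := by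
        intro y hy
        exact hQ y (by rw [hQd, hQt]; simp [hy])
      have AB := foldAB N allT wf x s i (adjOf G x) vis par q found pv
        (adj_InR hG x) hlv hlp hInv ⟨hxInR, hxvis⟩ (by omega) ⟨hs.2.1, hs.2.2.1, hs.2.2.2⟩
        hfv hfsub hnd hQ'
      have hguard := found_lt hnd hfsub hs.1 hs.2.2.2
      -- unfold one step of each loop
      simp only [loopA, loopB, hilt, if_true, hguard, hgetD, hQt]
      have IH := ih (List.foldl (stepB allT x) (vis, par, q, []) (adjOf G x)).2.2.1 (i + 1)
        (List.foldl (stepA allT wf x) (vis, par, q.drop (i + 1), found, pv) (adjOf G x)).1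
        (List.foldl (stepA allT wf x) (vis, par, q.drop (i + 1), found, pv) (adjOf G x)).2.1
        (List.foldl (stepA allT wf x) (vis, par, q.drop (i + 1), found, pv) (adjOf G x)).2.2.2.1
        (List.foldl (stepA allT wf x) (vis, par, q.drop (i + 1), found, pv) (adjOf G x)).2.2.2.2
        s AB.lv AB.lp AB.inv ⟨hs.1, hs.2.1, AB.wit.1, AB.wit.2⟩ AB.fvis AB.fsub AB.fnd AB.qvis
      obtain ⟨IH1, IH2, IH3⟩ := IH
      have hBL : loopB G allT f (List.foldl (stepB allT x) (vis, par, q, []) (adjOf G x)).2.2.1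
          (i + 1)
          (List.foldl (stepB allT x) (vis, par, q, []) (adjOf G x)).1
          (List.foldl (stepB allT x) (vis, par, q, []) (adjOf G x)).2.1
          (List.foldl (stepB allT x) (vis, par, q, []) (adjOf G x)).2.2.2
          = ((loopB G allT f (List.foldl (stepB allT x) (vis, par, q, []) (adjOf G x)).2.2.1
                (i + 1)
                (List.foldl (stepA allT wf x) (vis, par, q.drop (i + 1), found, pv) (adjOf G x)).1
                (List.foldl (stepA allT wf x) (vis, par, q.drop (i + 1), found, pv) (adjOf G x)).2.1
                []).1,
             (List.foldl (stepB allT x) (vis, par, q, []) (adjOf G x)).2.2.2 ++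
             (loopB G allT f (List.foldl (stepB allT x) (vis, par, q, []) (adjOf G x)).2.2.1
                (i + 1)
                (List.foldl (stepA allT wf x) (vis, par, q.drop (i + 1), found, pv) (adjOf G x)).1
                (List.foldl (stepA allT wf x) (vis, par, q.drop (i + 1), found, pv) (adjOf G x)).2.1
                []).2) := by
        rw [← AB.vis_eq, ← AB.par_eq, loopB_r]
      simp only [hBL]
      refine ⟨?_, ?_, ?_⟩
      · rw [AB.q_eq, IH1, AB.pveq _ IH2, ← List.foldl_append]
      · intro u hu hb
        exact (IH2 u hu (AB.mono u hu hb)).trans (AB.stab u hu hb)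
      · exact IH3

theorem source_eq (N : Int) (G : List (Int × List Int)) (allT : PySem.Set Int)
    (hG : ∀ p ∈ G, ∀ v ∈ p.2, InR N v) (target : Int) (hT : target ∈ allT)
    (hInR : InR N target) (pv : PySem.Set Int) :
    loopA G allT (N + 2).toNat (N + 2).toNat [target]
      (sB (List.replicate (N + 1).toNat false) target true)
      (List.replicate (N + 1).toNat (none : Option Int)) PySem.Set.empty pv
    = (loopB G allT (N + 2).toNat [target] 0
        (sB (List.replicate (N + 1).toNat false) target true)
        (List.replicate (N + 1).toNat (none : Option Int)) []).2.foldl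
        (fun acc t => walkChain
          (loopB G allT (N + 2).toNat [target] 0
            (sB (List.replicate (N + 1).toNat false) target true)
            (List.replicate (N + 1).toNat (none : Option Int)) []).1 (N + 2).toNat t acc) pv := by
  have hlv0 : (sB (List.replicate (N + 1).toNat false) target true).length = (N + 1).toNat := by
    rw [len_sB]; simp
  have hb0 : gB (sB (List.replicate (N + 1).toNat false) target true) target = true := by
    rw [gB_sB (by simp) hInR hInR]; simp
  have h := loop_eq N G allT (N + 2).toNat hG (N + 2).toNat [target] 0
    (sB (List.replicate (N + 1).toNat false) target true)
    (List.replicate (N + 1).toNat (none : Option Int)) PySem.Set.empty pv target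
    hlv0 (by simp) InvP_repl ⟨hT, hInR, hb0, by simp [PySem.Set.empty]⟩
    (by simp [PySem.Set.empty]) (by simp [PySem.Set.empty]) (by simp [PySem.Set.empty])
    (by
      intro y hy
      simp only [List.drop_zero, List.mem_singleton] at hy
      subst hy
      exact ⟨hInR, hb0⟩)
  simpa using h.1

-- ===== stage 2: the mid-layer's parent chains equal B's order-scan reconstruction =====

-- find? helpers
theorem find?_congr_mem {α : Type} {f g : α → Bool} :
    ∀ (l : List α), (∀ a ∈ l, f a = g a) → l.find? f = l.find? g := by
  intro l
  induction l with
  | nil => intro _; rfl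
  | cons a tl ih =>
    intro h
    simp only [List.find?]
    rw [h a (by simp)]
    cases g a
    · exact ih (fun b hb => h b (by simp [hb]))
    · rfl

theorem find?_extend {α : Type} {f : α → Bool} {l l' : List α} {u : α}
    (h : l.find? f = some u) : (l ++ l').find? f = some u := by
  rw [List.find?_append, h]; rfl

theorem find?_at_index {α : Type} [Inhabited α] {f : α → Bool} :
    ∀ (l : List α) (i : Nat), i < l.length →
    (∀ j : Nat, j < i → f (l.getD j default) = false) → f (l.getD i default) = true →
    l.find? f = some (l.getD i default) := by
  intro l
  induction l with
  | nil => intro i hi; simp at hi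
  | cons a tl ih =>
    intro i hi hfail hhit
    cases i with
    | zero =>
      simp only [List.getD_cons_zero] at hhit ⊢
      simp [List.find?, hhit]
    | succ i =>
      have h0 : f a = false := by
        have := hfail 0 (by omega)
        simpa using this
      simp only [List.getD_cons_succ] at hhit ⊢
      simp only [List.find?, h0]
      exact ih i (by simpa using hi) (fun j hj => by simpa using hfail (j + 1) (by omega)) hhit

-- the invariant tying the mid-layer's (vis, par) to B's (dist, order)
structure InvBD (N : Int) (G : List (Int × List Int)) (s : Int)
    (vis : List Bool) (par dist : List (Option Int)) (q : List Int) (i : Nat) : Prop where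
  lv : vis.length = (N + 1).toNat
  lp : par.length = (N + 1).toNat
  ld : dist.length = (N + 1).toNat
  vd : ∀ v : Int, InR N v → gB vis v = (gP dist v).isSome
  qm : ∀ v ∈ q, InR N v ∧ gB vis v = true
  pq : ∀ v ∈ q, v ≠ s → (gP par v).isSome = true
  i1 : ∀ j : Nat, j < i → j < q.length → ∀ v ∈ adjOf G (q.getD j 0), gB vis v = true
  ps : gP par s = none
  ds : gP dist s = some 0
  psi : ∀ w ∈ q, ∀ u : Int, gP par w = some u →
      q.find? (fun u' => condSc G dist w u') = some u
  sInR : InR N s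

-- what the walk needs about the finished tables
structure FinalRel (N : Int) (G : List (Int × List Int)) (s : Int)
    (P dist : List (Option Int)) (q : List Int) : Prop where
  qm : ∀ v ∈ q, InR N v
  pq : ∀ v ∈ q, v ≠ s → (gP P v).isSome = true
  ps : gP P s = none
  psi : ∀ w ∈ q, ∀ u : Int, gP P w = some u →
      q.find? (fun u' => condSc G dist w u') = some u

theorem walk_BD {N : Int} {G : List (Int × List Int)} {s : Int}
    {P dist : List (Option Int)} {q : List Int} (h : FinalRel N G s P dist q) :
    ∀ (f : Nat) (v : Int) (pv : PySem.Set Int), v ∈ q →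
      walkChain P f v pv = walkL G q dist s f v pv := by
  intro f
  induction f with
  | zero => intro v pv _; rfl
  | succ f ih =>
    intro v pv hv
    by_cases hvs : v = s
    · subst hvs
      simp [walkChain, walkL, h.ps]
    · obtain ⟨u, hu⟩ := Option.isSome_iff_exists.1 (h.pq v hv hvs)
      have hfind := h.psi v hv u hu
      have humem : u ∈ q := List.mem_of_find?_eq_some hfind
      simp only [walkChain, walkL, hu, hfind, if_neg hvs]
      exact ih u _ humem

-- conclusions of one adjacency fold of the (stepB, stepD) pair
structure BDRel (N : Int) (G : List (Int × List Int)) (s : Int) (i : Nat)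
    (vis : List Bool) (q r vs : List Int)
    (a : List Bool × List (Option Int) × List Int × List Int)
    (d : List (Option Int) × List Int × List Int) : Prop where
  qe : a.2.2.1 = d.2.1
  re : a.2.2.2 = d.2.2
  inv : InvBD N G s a.1 a.2.1 d.1 a.2.2.1 i
  ext : ∃ tl, a.2.2.1 = q ++ tl
  cov : ∀ v ∈ vs, gB a.1 v = true
  mono : ∀ u : Int, InR N u → gB vis u = true → gB a.1 u = true
  rq : ∀ t ∈ a.2.2.2, t ∈ a.2.2.1

theorem foldBD (N : Int) (G : List (Int × List Int)) (allT : PySem.Set Int) (s x : Int) (i : Nat)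
    (hGadj : ∀ (y : Int), ∀ w ∈ adjOf G y, InR N w)
    (vs : List Int) :
    ∀ (vis : List Bool) (par dist : List (Option Int)) (q r : List Int),
    (∀ v ∈ vs, InR N v) → (∀ v ∈ vs, v ∈ adjOf G x) →
    InvBD N G s vis par dist q i → i < q.length → q.getD i 0 = x →
    (∀ t ∈ r, t ∈ q) →
    BDRel N G s i vis q r vs
      (vs.foldl (stepB allT x) (vis, par, q, r))
      (vs.foldl (stepD allT x) (dist, q, r)) := by
  induction vs with
  | nil =>
    intro vis par dist q r hvs hsub hInv hi hgd hr
    exact { qe := rfl, re := rfl, inv := hInv, ext := ⟨[], by simp⟩,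
            cov := (by intro w hw; cases hw),
            mono := fun u _ h => h, rq := hr }
  | cons v tl ih =>
    intro vis par dist q r hvs hsub hInv hi hgd hr
    have hInRv : InR N v := hvs v (by simp)
    by_cases hb : gB vis v = true
    · have hds : (gP dist v).isSome = true := by rw [← hInv.vd v hInRv]; exact hb
      simp only [List.foldl_cons, stepB, stepD, hb, hds, if_true]
      have R := ih vis par dist q r (fun w hw => hvs w (by simp [hw]))
        (fun w hw => hsub w (by simp [hw])) hInv hi hgd hr
      exact { qe := R.qe, re := R.re, inv := R.inv, ext := R.ext,
              cov := (by
                intro w hw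
                rcases List.mem_cons.1 hw with h | h
                · subst h; exact R.mono w hInRv hb
                · exact R.cov w h),
              mono := R.mono, rq := R.rq }
    · have hvf : gB vis v = false := by simpa using hb
      have hdsf : (gP dist v).isSome = false := by rw [← hInv.vd v hInRv]; exact hvf
      have hxmem : x ∈ q := by
        rw [← hgd, List.getD_eq_getElem q 0 hi]; exact List.getElem_mem _
      obtain ⟨hxInR, hxvis⟩ := hInv.qm x hxmem
      have hsvis : gB vis s = true := by rw [hInv.vd s hInv.sInR, hInv.ds]; rfl
      have hslot_ne : ∀ u : Int, InR N u → gB vis u = true → slotN N u ≠ slotN N v := by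
        intro u hu hbu hc
        rw [gB_slot_congr hInv.lv hu hInRv hc, hvf] at hbu; cases hbu
      obtain ⟨dx, hdx⟩ : ∃ dx, gP dist x = some dx :=
        Option.isSome_iff_exists.1 (by rw [← hInv.vd x hxInR]; exact hxvis)
      have hlv1 : (sB vis v true).length = (N + 1).toNat := by rw [len_sB, hInv.lv]
      have hlp1 : (sP par v (some x)).length = (N + 1).toNat := by rw [len_sP, hInv.lp]
      have hld1 : (sP dist v (some ((gP dist x).getD 0 + 1))).length = (N + 1).toNat := by
        rw [len_sP, hInv.ld]
      have mono1 : ∀ u : Int, InR N u → gB vis u = true → gB (sB vis v true) u = true := by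
        intro u hu hbu
        rw [gB_sB hInv.lv hu hInRv]
        split <;> simp [hbu]
      have vis1v : gB (sB vis v true) v = true := by
        rw [gB_sB hInv.lv hInRv hInRv]; simp
      have distStab : ∀ u : Int, InR N u → gB vis u = true →
          gP (sP dist v (some ((gP dist x).getD 0 + 1))) u = gP dist u := by
        intro u hu hbu
        rw [gP_sP hInv.ld hu hInRv]
        split
        · exact absurd ‹slotN N u = slotN N v› (hslot_ne u hu hbu)
        · rfl
      have parStab : ∀ u : Int, InR N u → gB vis u = true →
          gP (sP par v (some x)) u = gP par u := by
        intro u hu hbu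
        rw [gP_sP hInv.lp hu hInRv]
        split
        · exact absurd ‹slotN N u = slotN N v› (hslot_ne u hu hbu)
        · rfl
      have dist1v : gP (sP dist v (some ((gP dist x).getD 0 + 1))) v
          = some ((gP dist x).getD 0 + 1) := by
        rw [gP_sP hInv.ld hInRv hInRv]; simp
      have par1v : gP (sP par v (some x)) v = some x := by
        rw [gP_sP hInv.lp hInRv hInRv]; simp
      have hgd' : (q ++ [v]).getD i 0 = x := by
        rw [List.getD_append _ _ _ _ hi]; exact hgd
      -- the new invariant after discovering v
      have hInv1 : InvBD N G s (sB vis v true) (sP par v (some x))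
          (sP dist v (some ((gP dist x).getD 0 + 1))) (q ++ [v]) i := by
        refine { lv := hlv1, lp := hlp1, ld := hld1, sInR := hInv.sInR,
                 vd := ?_, qm := ?_, pq := ?_, i1 := ?_, ps := ?_, ds := ?_, psi := ?_ }
        · intro w hw
          rw [gB_sB hInv.lv hw hInRv, gP_sP hInv.ld hw hInRv]
          split
          · rfl
          · exact hInv.vd w hw
        · intro w hw
          rcases List.mem_append.1 hw with h | h
          · obtain ⟨h1, h2⟩ := hInv.qm w h
            exact ⟨h1, mono1 w h1 h2⟩
          · simp at h; subst h; exact ⟨hInRv, vis1v⟩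
        · intro w hw hws
          rcases List.mem_append.1 hw with h | h
          · obtain ⟨h1, h2⟩ := hInv.qm w h
            rw [gP_sP hInv.lp h1 hInRv]
            split
            · rfl
            · exact hInv.pq w h hws
          · simp at h; subst h
            rw [par1v]; rfl
        · intro j hj hjl w hw
          have hjq : j < q.length := by omega
          rw [List.getD_append _ _ _ _ hjq] at hw
          exact mono1 w (hGadj (q.getD j 0) w hw) (hInv.i1 j hj hjq w hw)
        · rw [gP_sP hInv.lp hInv.sInR hInRv,
            if_neg (hslot_ne s hInv.sInR hsvis)]
          exact hInv.ps
        · rw [gP_sP hInv.ld hInv.sInR hInRv,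
            if_neg (hslot_ne s hInv.sInR hsvis)]
          exact hInv.ds
        · intro w hw u hu
          rcases List.mem_append.1 hw with h | h
          · obtain ⟨hwInR, hwvis⟩ := hInv.qm w h
            rw [gP_sP hInv.lp hwInR hInRv, if_neg (hslot_ne w hwInR hwvis)] at hu
            have hfq := hInv.psi w h u hu
            have hcongr : ∀ p ∈ q,
                condSc G (sP dist v (some ((gP dist x).getD 0 + 1))) w p
                  = condSc G dist w p := by
              intro p hp
              obtain ⟨hpInR, hpvis⟩ := hInv.qm p hp
              unfold condSc
              rw [distStab p hpInR hpvis, distStab w hwInR hwvis]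
            refine find?_extend ?_
            rw [find?_congr_mem q hcongr]
            exact hfq
          · have hwv : w = v := by simpa using h
            rw [hwv] at hu ⊢
            rw [par1v] at hu
            have hux : x = u := by injection hu
            rw [← hux]
            have hgiv : (q ++ [v]).getD i default = x := by
              rw [List.getD_append _ _ _ _ hi]; exact hgd
            have hres := find?_at_index (f := fun u' =>
                condSc G (sP dist v (some ((gP dist x).getD 0 + 1))) v u') (q ++ [v]) i
              (by simp; omega)
              (by
                intro j hj
                have hjq : j < q.length := by omega
                have hgj : (q ++ [v]).getD j default = q.getD j 0 :=
                  List.getD_append _ _ _ _ hjq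
                rw [hgj]
                have hnm : v ∉ adjOf G (q.getD j 0) := by
                  intro hm
                  rw [hInv.i1 j hj hjq v hm] at hvf
                  cases hvf
                have hcont : (adjOf G (q.getD j 0)).contains v = false := by
                  simpa using hnm
                simp only [condSc, hcont, Bool.and_false])
              (by
                rw [hgiv]
                have hcont : (adjOf G x).contains v = true := by
                  simpa using hsub v (by simp)
                simp only [condSc]
                rw [distStab x hxInR hxvis, dist1v, hdx, hcont]
                simp)
            rw [hgiv] at hres
            exact hres
      have hr1 : ∀ t ∈ (if PySem.Set.contains allT v then r ++ [v] else r), t ∈ q ++ [v] := by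
        split
        · intro t ht
          rcases List.mem_append.1 ht with h | h
          · exact List.mem_append.2 (Or.inl (hr t h))
          · exact List.mem_append.2 (Or.inr h)
        · intro t ht
          exact List.mem_append.2 (Or.inl (hr t ht))
      simp only [List.foldl_cons, stepB, stepD, hvf, Bool.false_eq_true, if_false, hdsf]
      have R := ih (sB vis v true) (sP par v (some x))
        (sP dist v (some ((gP dist x).getD 0 + 1))) (q ++ [v])
        (if PySem.Set.contains allT v then r ++ [v] else r)
        (fun w hw => hvs w (by simp [hw])) (fun w hw => hsub w (by simp [hw]))
        hInv1 (by simp; omega) hgd' hr1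
      refine { qe := R.qe, re := R.re, inv := R.inv, ext := ?_, cov := ?_, mono := ?_,
               rq := R.rq }
      · obtain ⟨tl', htl'⟩ := R.ext
        exact ⟨[v] ++ tl', by rw [htl']; simp⟩
      · intro w hw
        rcases List.mem_cons.1 hw with h | h
        · subst h; exact R.mono w hInRv vis1v
        · exact R.cov w h
      · intro u hu hbu
        exact R.mono u hu (mono1 u hu hbu)

theorem loopBD (N : Int) (G : List (Int × List Int)) (allT : PySem.Set Int) (s : Int)
    (hGadj : ∀ (y : Int), ∀ w ∈ adjOf G y, InR N w) :
    ∀ (f : Nat) (q : List Int) (i : Nat) (vis : List Bool) (par dist : List (Option Int))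
      (r : List Int),
    InvBD N G s vis par dist q i → (∀ t ∈ r, t ∈ q) →
    (loopB G allT f q i vis par r).2 = (loopD G allT f q i dist r).2.2 ∧
    (∀ t ∈ (loopB G allT f q i vis par r).2, t ∈ (loopD G allT f q i dist r).1) ∧
    FinalRel N G s (loopB G allT f q i vis par r).1 (loopD G allT f q i dist r).2.1
      (loopD G allT f q i dist r).1 := by
  intro f
  induction f with
  | zero =>
    intro q i vis par dist r hInv hr
    exact ⟨rfl, hr, { qm := fun v hv => (hInv.qm v hv).1, pq := hInv.pq, ps := hInv.ps,
                      psi := hInv.psi }⟩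
  | succ f ih =>
    intro q i vis par dist r hInv hr
    by_cases hq : i < q.length
    · have hF := foldBD N G allT s (q.getD i 0) i hGadj (adjOf G (q.getD i 0))
        vis par dist q r (hGadj (q.getD i 0)) (fun v hv => hv) hInv hq rfl hr
      obtain ⟨tl, htl⟩ := hF.ext
      have hgd2 : ((adjOf G (q.getD i 0)).foldl (stepB allT (q.getD i 0))
          (vis, par, q, r)).2.2.1.getD i 0 = q.getD i 0 := by
        rw [htl, List.getD_append _ _ _ _ hq]
      have hInv2 : InvBD N G s
          ((adjOf G (q.getD i 0)).foldl (stepB allT (q.getD i 0)) (vis, par, q, r)).1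
          ((adjOf G (q.getD i 0)).foldl (stepB allT (q.getD i 0)) (vis, par, q, r)).2.1
          ((adjOf G (q.getD i 0)).foldl (stepD allT (q.getD i 0)) (dist, q, r)).1
          ((adjOf G (q.getD i 0)).foldl (stepB allT (q.getD i 0)) (vis, par, q, r)).2.2.1
          (i + 1) := by
        refine { hF.inv with i1 := ?_ }
        intro j hj hjl w hw
        rcases Nat.lt_succ_iff_lt_or_eq.1 hj with h | h
        · exact hF.inv.i1 j h hjl w hw
        · subst h; rw [hgd2] at hw; exact hF.cov w hw
      have IH := ih ((adjOf G (q.getD i 0)).foldl (stepB allT (q.getD i 0))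
            (vis, par, q, r)).2.2.1 (i + 1)
          ((adjOf G (q.getD i 0)).foldl (stepB allT (q.getD i 0)) (vis, par, q, r)).1
          ((adjOf G (q.getD i 0)).foldl (stepB allT (q.getD i 0)) (vis, par, q, r)).2.1
          ((adjOf G (q.getD i 0)).foldl (stepD allT (q.getD i 0)) (dist, q, r)).1
          ((adjOf G (q.getD i 0)).foldl (stepB allT (q.getD i 0)) (vis, par, q, r)).2.2.2
          hInv2 hF.rq
      simp only [loopB, loopD, hq, if_true]
      rw [← hF.qe, ← hF.re]
      exact IH
    · have hB : loopB G allT (f + 1) q i vis par r = (par, r) := by simp [loopB, hq]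
      have hD : loopD G allT (f + 1) q i dist r = (q, dist, r) := by simp [loopD, hq]
      rw [hB, hD]
      exact ⟨rfl, hr, { qm := fun v hv => (hInv.qm v hv).1, pq := hInv.pq, ps := hInv.ps,
                        psi := hInv.psi }⟩

theorem srcEq (N : Int) (G : List (Int × List Int)) (allT : PySem.Set Int)
    (hGadj : ∀ (y : Int), ∀ w ∈ adjOf G y, InR N w)
    (source : Int) (hInR : InR N source) (pv : PySem.Set Int) :
    (loopB G allT (N + 2).toNat [source] 0
        (sB (List.replicate (N + 1).toNat false) source true)
        (List.replicate (N + 1).toNat (none : Option Int)) []).2.foldl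
        (fun acc t => walkChain
          (loopB G allT (N + 2).toNat [source] 0
            (sB (List.replicate (N + 1).toNat false) source true)
            (List.replicate (N + 1).toNat (none : Option Int)) []).1 (N + 2).toNat t acc) pv
    = (loopD G allT (N + 2).toNat [source] 0
        (sP (List.replicate (N + 1).toNat (none : Option Int)) source (some 0)) []).2.2.foldl
        (fun acc t => walkL G
          (loopD G allT (N + 2).toNat [source] 0
            (sP (List.replicate (N + 1).toNat (none : Option Int)) source (some 0)) []).1
          (loopD G allT (N + 2).toNat [source] 0
            (sP (List.replicate (N + 1).toNat (none : Option Int)) source (some 0)) []).2.1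
          source (N + 2).toNat t acc) pv := by
  have hb0 : gB (sB (List.replicate (N + 1).toNat false) source true) source = true := by
    rw [gB_sB (by simp) hInR hInR]; simp
  have hInv0 : InvBD N G source (sB (List.replicate (N + 1).toNat false) source true)
      (List.replicate (N + 1).toNat (none : Option Int))
      (sP (List.replicate (N + 1).toNat (none : Option Int)) source (some 0)) [source] 0 := by
    refine { lv := by rw [len_sB]; simp, lp := by simp, ld := by rw [len_sP]; simp,
             sInR := hInR, vd := ?_, qm := ?_, pq := ?_, i1 := ?_, ps := ?_, ds := ?_,
             psi := ?_ }
    · intro w hw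
      rw [gB_sB (by simp) hw hInR, gP_sP (by simp) hw hInR]
      split
      · rfl
      · rw [gB_repl hw, gP_repl hw]; rfl
    · intro w hw
      have hws : w = source := by simpa using hw
      subst hws
      exact ⟨hInR, hb0⟩
    · intro w hw hws
      exact absurd (by simpa using hw) hws
    · intro j hj; omega
    · exact gP_repl hInR
    · rw [gP_sP (by simp) hInR hInR]; simp
    · intro w hw u hu
      have hws : w = source := by simpa using hw
      subst hws
      rw [gP_repl hInR] at hu
      cases hu
  obtain ⟨hre, hmem, hfin⟩ := loopBD N G allT source hGadj (N + 2).toNat [source] 0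
    (sB (List.replicate (N + 1).toNat false) source true)
    (List.replicate (N + 1).toNat (none : Option Int))
    (sP (List.replicate (N + 1).toNat (none : Option Int)) source (some 0)) []
    hInv0 (by intro t ht; cases ht)
  rw [hre]
  apply PySem.List.foldl_congr_mem
  intro acc t ht
  exact walk_BD hfin (N + 2).toNat t acc (hmem t (by rw [hre]; exact ht))

-- ===== VERDICT (by name: the statement is the Claim_ definition above) =====
theorem BFS_spec : Claim_equal_BFS := by
  intro N G needed hdom hpre
  show BFS N G needed = BFS_alt N G needed
  by_cases hne : needed = []
  · simp [BFS, BFS_alt, hne]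
  · rcases hpre with h0 | ⟨hT, hGpre⟩
    · exact absurd h0 hne
    have hG : ∀ p ∈ G, ∀ v ∈ p.2, InR N v :=
      fun p hp v hv => ⟨(hGpre p hp v hv).1.1, (hGpre p hp v hv).1.2⟩
    have hstart : pySetFirst needed ∈ needed := pySetFirst_mem hne
    simp only [BFS, BFS_alt, hne, if_false]
    apply PySem.List.foldl_congr_mem
    intro acc x hx
    have hInR : InR N x := by
      rcases (PySem.Set.mem_add _ _ _).1 hx with hx' | hx'
      · have := hT x ((PySem.Set.mem_ofList _ _).1 hx')
        exact ⟨this.1.1, this.1.2⟩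
      · subst hx'
        have := hT _ hstart
        exact ⟨this.1.1, this.1.2⟩
    exact (source_eq N G _ hG x hx hInR acc).trans
      (srcEq N G _ (fun y => adj_InR hG y) x hInR acc)
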